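-- pv_equiv track=rewrite | github.com/trojblue/lenslet | scripts/check_frontend_packaging_sync.py | diff_trees
-- ===== SOURCE A (Python) =====
-- def diff_trees(expected: dict[str, str], actual: dict[str, str]) -> dict[str, list[str]]:
--     expected_paths = set(expected)
--     actual_paths = set(actual)
--
--     missing = sorted(expected_paths - actual_paths)
--     extra = sorted(actual_paths - expected_paths)
--     changed = sorted(path for path in (expected_paths & actual_paths) if expected[path] != actual[path])
--
--     return {
--         "missing": missing,
--         "extra": extra,
--         "changed": changed,
--     }
-- ===== SOURCE B (Python) =====
-- def diff_trees(expected: dict[str, str], actual: dict[str, str]) -> dict[str, list[str]]: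
--     missing, extra, changed = [], [], []
--     for path in sorted(set(expected) | set(actual)):
--         if path not in actual:
--             missing.append(path)
--         elif path not in expected:
--             extra.append(path)
--         elif expected[path] != actual[path]:
--             changed.append(path)
--     return {"missing": missing, "extra": extra, "changed": changed}
-- ===== Notes on version B (the rewrite author's own statement) =====
-- stated objective: alternative
-- what changed: Replaces the three set-difference/intersection computations and three separate sorts by one sorted union of the key sets and a single classifying loop that appends each path to missing/extra/changed.
import Mathlib
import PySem

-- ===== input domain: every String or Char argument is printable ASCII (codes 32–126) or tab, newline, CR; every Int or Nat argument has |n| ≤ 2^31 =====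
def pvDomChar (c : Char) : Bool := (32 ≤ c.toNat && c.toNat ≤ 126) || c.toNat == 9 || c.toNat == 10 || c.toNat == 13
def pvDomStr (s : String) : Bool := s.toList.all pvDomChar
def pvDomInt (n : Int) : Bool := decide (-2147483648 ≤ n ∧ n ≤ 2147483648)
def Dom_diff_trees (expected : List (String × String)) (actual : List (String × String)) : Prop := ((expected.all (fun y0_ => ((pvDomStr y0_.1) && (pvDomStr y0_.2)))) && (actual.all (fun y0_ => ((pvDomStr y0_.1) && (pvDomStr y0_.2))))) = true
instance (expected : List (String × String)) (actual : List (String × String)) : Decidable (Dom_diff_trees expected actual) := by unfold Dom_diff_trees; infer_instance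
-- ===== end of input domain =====

-- B replaces A's three set operations + three sorts by one sorted key union and a single
-- classifying loop (alternative decomposition, same asymptotic cost).

-- ===== PORT A =====
-- expected[path] != actual[path] is ported as get? ≠ get?: both keys are present there,
-- so both lookups are `some` and the comparison is exact.
def diff_trees (expected : List (String × String)) (actual : List (String × String)) : List (String × List String) :=
  let ed := PySem.Dict.ofList expected
  let ad := PySem.Dict.ofList actual
  let expected_paths : PySem.Set String := PySem.Set.ofList (PySem.Dict.keys ed)
  let actual_paths : PySem.Set String := PySem.Set.ofList (PySem.Dict.keys ad)
  let missing := PySem.List.sorted (PySem.Set.diff expected_paths actual_paths) (fun x => x) false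
  let extra := PySem.List.sorted (PySem.Set.diff actual_paths expected_paths) (fun x => x) false
  let changed := PySem.List.sorted
    ((PySem.Set.inter expected_paths actual_paths).filter
      (fun p => PySem.Dict.get? ed p != PySem.Dict.get? ad p)) (fun x => x) false
  [("missing", missing), ("extra", extra), ("changed", changed)]

-- ===== PORT B =====
def diff_trees_alt (expected : List (String × String)) (actual : List (String × String)) : List (String × List String) :=
  let ed := PySem.Dict.ofList expected
  let ad := PySem.Dict.ofList actual
  let allPaths := PySem.List.sorted
    (PySem.Set.union (PySem.Set.ofList (PySem.Dict.keys ed)) (PySem.Set.ofList (PySem.Dict.keys ad))) (fun x => x) false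
  let r := allPaths.foldl (fun (acc : List String × List String × List String) p =>
      if !(PySem.Dict.contains ad p) then (acc.1 ++ [p], acc.2.1, acc.2.2)
      else if !(PySem.Dict.contains ed p) then (acc.1, acc.2.1 ++ [p], acc.2.2)
      else if (PySem.Dict.get? ed p != PySem.Dict.get? ad p) then (acc.1, acc.2.1, acc.2.2 ++ [p])
      else acc) ([], [], [])
  [("missing", r.1), ("extra", r.2.1), ("changed", r.2.2)]

-- ===== PRECONDITION & SPEC =====
def Spec_diff_trees (expected : List (String × String)) (actual : List (String × String)) (out : List (String × List String)) : Prop := out = diff_trees_alt expected actual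
instance (expected : List (String × String)) (actual : List (String × String)) (out : List (String × List String)) : Decidable (Spec_diff_trees expected actual out) := by unfold Spec_diff_trees; infer_instance

-- ===== CLAIM (what is proved, stated in full; the proofs are below) =====
def Claim_equal_diff_trees : Prop := ∀ (expected : List (String × String)) (actual : List (String × String)), Dom_diff_trees expected actual → Spec_diff_trees expected actual (diff_trees expected actual)

-- ===== LEMMAS AND PROOFS =====

-- B's single classifying loop, in closed form: three filters of the traversed list.
theorem foldl_classify (c1 c2 c3 : String → Bool) (l m e c : List String) :
    l.foldl (fun (acc : List String × List String × List String) p =>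
      if c1 p then (acc.1 ++ [p], acc.2.1, acc.2.2)
      else if c2 p then (acc.1, acc.2.1 ++ [p], acc.2.2)
      else if c3 p then (acc.1, acc.2.1, acc.2.2 ++ [p])
      else acc) (m, e, c)
    = (m ++ l.filter c1, e ++ l.filter (fun p => !c1 p && c2 p),
       c ++ l.filter (fun p => !c1 p && !c2 p && c3 p)) := by
  induction l generalizing m e c with
  | nil => simp
  | cons x xs ih =>
    simp only [List.foldl_cons, List.filter_cons]
    cases h1 : c1 x <;> cases h2 : c2 x <;> cases h3 : c3 x <;>
      simp [ih]

-- Filtering a sorted nodup list is the sort of the corresponding sub-set.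
theorem sorted_filter_eq (u xs : List String) (c : String → Bool) (hu : u.Nodup)
    (hxs : xs.Nodup) (hmem : ∀ p, p ∈ xs ↔ p ∈ u ∧ c p = true) :
    (PySem.List.sorted u (fun x => x) false).filter c = PySem.List.sorted xs (fun x => x) false := by
  have hperm : (PySem.List.sorted u (fun x => x) false).Perm u := PySem.List.sorted_perm u _ false
  have hnd : (PySem.List.sorted u (fun x => x) false).Nodup := hperm.nodup_iff.mpr hu
  have hle : (PySem.List.sorted u (fun x => x) false).Pairwise (fun a b => a ≤ b) :=
    PySem.List.sorted_pairwise u (fun x => x)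
  have hlt : (PySem.List.sorted u (fun x => x) false).Pairwise (fun a b : String => a < b) :=
    (hle.and hnd).imp (fun h => lt_of_le_of_ne h.1 h.2)
  have hflt : ((PySem.List.sorted u (fun x => x) false).filter c).Pairwise (fun a b : String => a < b) :=
    hlt.filter c
  have hfperm : ((PySem.List.sorted u (fun x => x) false).filter c).Perm xs := by
    rw [List.perm_ext_iff_of_nodup (hnd.filter c) hxs]
    intro a
    rw [List.mem_filter, hperm.mem_iff]
    exact (hmem a).symm
  exact (PySem.List.sorted_eq_of_perm_of_pairwise_lt xs _ (fun x => x) hfperm hflt).symm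

-- ===== VERDICT (by name: the statement is the Claim_ definition above) =====
theorem diff_trees_spec : Claim_equal_diff_trees := by
  intro expected actual _
  unfold Spec_diff_trees diff_trees diff_trees_alt
  dsimp only
  have hek : (PySem.Dict.keys (PySem.Dict.ofList expected)).Nodup :=
    PySem.Dict.nodup_keys_ofList expected
  have hak : (PySem.Dict.keys (PySem.Dict.ofList actual)).Nodup :=
    PySem.Dict.nodup_keys_ofList actual
  generalize hgE : PySem.Dict.ofList expected = E at hek ⊢
  generalize hgA : PySem.Dict.ofList actual = A at hak ⊢
  rw [PySem.Set.ofList_eq_self_of_nodup _ hek, PySem.Set.ofList_eq_self_of_nodup _ hak,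
    foldl_classify]
  have hu : (PySem.Set.union (PySem.Dict.keys E) (PySem.Dict.keys A)).Nodup :=
    PySem.Set.nodup_union _ _ hek
  have h1 : (PySem.List.sorted (PySem.Set.union (PySem.Dict.keys E) (PySem.Dict.keys A))
        (fun x => x) false).filter (fun p => !(PySem.Dict.contains A p))
      = PySem.List.sorted (PySem.Set.diff (PySem.Dict.keys E) (PySem.Dict.keys A))
          (fun x => x) false := by
    apply sorted_filter_eq _ _ _ hu (PySem.Set.nodup_diff _ _ hek)
    intro p
    simp only [PySem.Set.mem_diff, PySem.Set.mem_union,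
      PySem.Dict.contains_eq_decide_mem_keys, decide_eq_false_iff_not,
      Bool.not_eq_eq_eq_not, Bool.not_true]
    tauto
  have h2 : (PySem.List.sorted (PySem.Set.union (PySem.Dict.keys E) (PySem.Dict.keys A))
        (fun x => x) false).filter
      (fun p => !(!(PySem.Dict.contains A p)) && !(PySem.Dict.contains E p))
      = PySem.List.sorted (PySem.Set.diff (PySem.Dict.keys A) (PySem.Dict.keys E))
          (fun x => x) false := by
    apply sorted_filter_eq _ _ _ hu (PySem.Set.nodup_diff _ _ hak)
    intro p
    simp only [PySem.Set.mem_diff, PySem.Set.mem_union, Bool.not_not, Bool.and_eq_true,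
      PySem.Dict.contains_eq_decide_mem_keys, decide_eq_false_iff_not,
      Bool.not_eq_true', decide_eq_true_eq]
    tauto
  have h3 : (PySem.List.sorted (PySem.Set.union (PySem.Dict.keys E) (PySem.Dict.keys A))
        (fun x => x) false).filter
      (fun p => !(!(PySem.Dict.contains A p)) && !(!(PySem.Dict.contains E p)) &&
          (PySem.Dict.get? E p != PySem.Dict.get? A p))
      = PySem.List.sorted ((PySem.Set.inter (PySem.Dict.keys E) (PySem.Dict.keys A)).filter
          (fun p => PySem.Dict.get? E p != PySem.Dict.get? A p)) (fun x => x) false := by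
    apply sorted_filter_eq _ _ _ hu ((PySem.Set.nodup_inter _ _ hek).filter _)
    intro p
    simp only [List.mem_filter, PySem.Set.mem_inter, PySem.Set.mem_union, Bool.not_not,
      Bool.and_eq_true, PySem.Dict.contains_eq_decide_mem_keys, decide_eq_true_eq]
    tauto
  simp only [h1, h2, h3, List.nil_append]
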